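-- pv_equiv track=rewrite | github.com/T9-AI/approv-sys2 | app.py | extract_setup_values
-- ===== SOURCE A (Python) =====
-- from typing import Any, Dict, List, Optional, Tuple
--
-- def extract_setup_values(mapping: dict) -> Dict[str, str]:
--     """Extract setup-mask fields (project/unit/request_type) from any mapping (args/form)."""
--     project = first_nonempty(
--         mapping.get("project"),
--         mapping.get("project_name"),
--         mapping.get("project_code"),
--     )
--     unit_no = first_nonempty(
--         mapping.get("unit_no"),
--         mapping.get("unit"),
--         mapping.get("unit_number"),
--         mapping.get("unit_id"),
--     )
--     req_type = first_nonempty(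
--         mapping.get("request_type"),
--         mapping.get("req_type"),
--         mapping.get("request_kind"),
--         mapping.get("type"),
--     ) or ""
--
--     setup = {
--         "project": (project or "").strip(),
--         "unit_no": (unit_no or "").strip(),
--         "request_type": (req_type or "").strip(),
--     }
--     # drop empties
--     return {k: v for k, v in setup.items() if v}
--
-- def first_nonempty(*vals: Any) -> str:
--     for v in vals:
--         if v is None:
--             continue
--         s = str(v).strip()
--         if s:
--             return s
--     return ""
-- ===== SOURCE B (Python) =====
-- # Single pass over the mapping's items: each relevant input key carries a
-- # (field, priority) tag; keep the lowest-priority non-empty stripped value per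
-- # field, then emit the three fields in order, skipping absent ones.
-- _KEY2FIELD = {
--     "project": ("project", 0),
--     "project_name": ("project", 1),
--     "project_code": ("project", 2),
--     "unit_no": ("unit_no", 0),
--     "unit": ("unit_no", 1),
--     "unit_number": ("unit_no", 2),
--     "unit_id": ("unit_no", 3),
--     "request_type": ("request_type", 0),
--     "req_type": ("request_type", 1),
--     "request_kind": ("request_type", 2),
--     "type": ("request_type", 3),
-- }
--
-- _FIELDS = ("project", "unit_no", "request_type")
--
--
-- def extract_setup_values(mapping: dict):
--     best = {}  # field -> (priority, stripped value)
--     for k, v in mapping.items():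
--         tag = _KEY2FIELD.get(k)
--         if tag is None or v is None:
--             continue
--         field, rank = tag
--         s = str(v).strip()
--         if s and (field not in best or rank < best[field][0]):
--             best[field] = (rank, s)
--     return {f: best[f][1] for f in _FIELDS if f in best}
-- ===== Notes on version B (the rewrite author's own statement) =====
-- stated objective: alternative
-- what changed: Instead of walking per-field candidate key lists with repeated mapping.get lookups (first_nonempty three times), B makes one pass over the mapping's items, tagging each relevant key via a key->(field,priority) table and keeping the lowest-priority non-empty stripped value per field.
import Mathlib
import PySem

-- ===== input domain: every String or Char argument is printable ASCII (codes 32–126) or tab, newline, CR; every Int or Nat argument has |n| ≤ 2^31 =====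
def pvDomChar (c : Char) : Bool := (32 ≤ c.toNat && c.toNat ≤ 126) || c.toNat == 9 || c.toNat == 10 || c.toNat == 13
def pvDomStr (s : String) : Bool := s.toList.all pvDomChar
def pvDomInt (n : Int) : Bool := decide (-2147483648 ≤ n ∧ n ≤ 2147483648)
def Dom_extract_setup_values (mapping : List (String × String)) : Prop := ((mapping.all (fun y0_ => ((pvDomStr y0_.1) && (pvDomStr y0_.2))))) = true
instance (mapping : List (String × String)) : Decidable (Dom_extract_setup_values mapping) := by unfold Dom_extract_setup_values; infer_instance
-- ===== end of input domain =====

-- B replaces A's per-field candidate walks (first_nonempty over repeated mapping.get calls)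
-- by ONE pass over the mapping's items, tagging each relevant key with a (field, priority)
-- and keeping the lowest-priority non-empty stripped value per field (alternative, same cost).


-- ===== PORT A =====
-- mapping.get(k) on the association list (Python dict under the type convention)
def mget (mapping : List (String × String)) (k : String) : Option String :=
  PySem.Dict.get? (PySem.Dict.mk mapping) k

-- first_nonempty(*vals): skip None, return the first str(v).strip() that is non-empty, else ""
def pyFirstNonempty : List (Option String) → String
  | [] => ""
  | none :: rest => pyFirstNonempty rest
  | some v :: rest =>
      let s := PySem.Str.strip v
      if s ≠ "" then s else pyFirstNonempty rest

def extract_setup_values (mapping : List (String × String)) : List (String × String) :=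
  let project := pyFirstNonempty
    [mget mapping "project", mget mapping "project_name",
     mget mapping "project_code"]
  let unit_no := pyFirstNonempty
    [mget mapping "unit_no", mget mapping "unit",
     mget mapping "unit_number", mget mapping "unit_id"]
  let req_type0 := pyFirstNonempty
    [mget mapping "request_type", mget mapping "req_type",
     mget mapping "request_kind", mget mapping "type"]
  -- `… or ""`
  let req_type := if req_type0 ≠ "" then req_type0 else ""
  let setup : List (String × String) :=
    [("project", PySem.Str.strip (if project ≠ "" then project else "")),
     ("unit_no", PySem.Str.strip (if unit_no ≠ "" then unit_no else "")),
     ("request_type", PySem.Str.strip (if req_type ≠ "" then req_type else ""))]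
  setup.filter (fun kv => kv.2 ≠ "")

-- ===== PORT B =====
-- _KEY2FIELD.get(k): tag each relevant input key with its output field and priority
def key2field (k : String) : Option (String × Nat) :=
  PySem.Dict.get? (PySem.Dict.mk
    [("project", ("project", 0)), ("project_name", ("project", 1)),
     ("project_code", ("project", 2)),
     ("unit_no", ("unit_no", 0)), ("unit", ("unit_no", 1)),
     ("unit_number", ("unit_no", 2)), ("unit_id", ("unit_no", 3)),
     ("request_type", ("request_type", 0)), ("req_type", ("request_type", 1)),
     ("request_kind", ("request_type", 2)), ("type", ("request_type", 3))]) k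

-- `field not in best or rank < best[field][0]`
def better (rank : Nat) : Option (Nat × String) → Bool
  | none => true
  | some p => rank < p.1

-- loop body: best[field] = (rank, s) when s is non-empty and rank improves
def bstep (best : PySem.Dict String (Nat × String)) (kv : String × String) :
    PySem.Dict String (Nat × String) :=
  match key2field kv.1 with
  | none => best
  | some fr =>
      let s := PySem.Str.strip kv.2
      if s ≠ "" ∧ better fr.2 (best.get? fr.1) then best.insert fr.1 (fr.2, s) else best

def extract_setup_values_alt (mapping : List (String × String)) : List (String × String) :=
  let best := mapping.foldl bstep PySem.Dict.empty
  ["project", "unit_no", "request_type"].foldl (fun out f =>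
    match best.get? f with
    | some p => out ++ [(f, p.2)]
    | none => out) []

-- ===== PRECONDITION & SPEC =====
-- Pre_ excludes association lists with duplicate keys: they cannot arise from a Python
-- dict (the argument's type), and on them A's first-match lookups and B's scan order are
-- both accidental representation artefacts.
def Pre_extract_setup_values (mapping : List (String × String)) : Prop :=
  (mapping.map Prod.fst).Nodup
instance (mapping : List (String × String)) : Decidable (Pre_extract_setup_values mapping) := by
  unfold Pre_extract_setup_values; infer_instance

def pvWitness_extract_setup_values : (List (String × String)) :=
  [("project", " Alpha "), ("type", "NEW"), ("note", "x")]

def Spec_extract_setup_values (mapping : List (String × String)) (out : List (String × String)) : Prop := out = extract_setup_values_alt mapping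
instance (mapping : List (String × String)) (out : List (String × String)) : Decidable (Spec_extract_setup_values mapping out) := by unfold Spec_extract_setup_values; infer_instance

-- ===== CLAIM (what is proved, stated in full; the proofs are below) =====
def Claim_equal_extract_setup_values : Prop := ∀ (mapping : List (String × String)), Dom_extract_setup_values mapping → Pre_extract_setup_values mapping → Spec_extract_setup_values mapping (extract_setup_values mapping)

-- ===== LEMMAS AND PROOFS =====

-- strip is idempotent (not in the PySem book)
theorem dropWhile_take (p : Char → Bool) (l : List Char) (n : Nat)
    (h : l.dropWhile p = l) : (l.take n).dropWhile p = l.take n := by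
  cases l with
  | nil => simp
  | cons a t =>
      have ha : p a = false := by
        by_contra hp
        have hp' : p a = true := by simpa using hp
        have := List.length_dropWhile_le p t
        rw [List.dropWhile_cons, if_pos hp'] at h
        have := congrArg List.length h
        simp at this
        omega
      cases n with
      | zero => simp
      | succ m => simp [ha]

theorem rstrip_prefix (l : List Char) : PySem.Chars.rstrip l <+: l := by
  have hs : l.reverse.dropWhile PySem.Chars.isspace <:+ l.reverse :=
    List.dropWhile_suffix _
  unfold PySem.Chars.rstrip
  have h2 : (l.reverse.dropWhile PySem.Chars.isspace).reverse <+: l.reverse.reverse :=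
    List.reverse_prefix.mpr hs
  simpa using h2

theorem strip_idem (l : List Char) :
    PySem.Chars.strip (PySem.Chars.strip l) = PySem.Chars.strip l := by
  unfold PySem.Chars.strip
  have h1 : PySem.Chars.lstrip (PySem.Chars.rstrip (PySem.Chars.lstrip l))
      = PySem.Chars.rstrip (PySem.Chars.lstrip l) := by
    have hpre := rstrip_prefix (PySem.Chars.lstrip l)
    have hn : PySem.Chars.rstrip (PySem.Chars.lstrip l)
        = (PySem.Chars.lstrip l).take (PySem.Chars.rstrip (PySem.Chars.lstrip l)).length :=
      List.prefix_iff_eq_take.mp hpre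
    unfold PySem.Chars.lstrip at *
    rw [hn]
    exact dropWhile_take _ _ _ (List.dropWhile_idempotent _ _)
  rw [h1]
  unfold PySem.Chars.rstrip
  simp [List.dropWhile_idempotent _ _]

theorem str_strip_idem (s : String) :
    PySem.Str.strip (PySem.Str.strip s) = PySem.Str.strip s := by
  unfold PySem.Str.strip
  simp [strip_idem]

theorem strip_firstNonempty (l : List (Option String)) :
    PySem.Str.strip (pyFirstNonempty l) = pyFirstNonempty l := by
  induction l with
  | nil => simp [pyFirstNonempty]; rfl
  | cons o t ih =>
      cases o with
      | none => simpa [pyFirstNonempty] using ih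
      | some v =>
          simp only [pyFirstNonempty]
          by_cases h : PySem.Str.strip v = ""
          · simpa [h] using ih
          · simp [h, str_strip_idem]

-- A's per-field value, written as a scan of the candidate list with first-match lookups
def pickFirst (mapping : List (String × String)) : List String → String
  | [] => ""
  | k :: ks =>
      match mget mapping k with
      | none => pickFirst mapping ks
      | some v =>
          let s := PySem.Str.strip v
          if s ≠ "" then s else pickFirst mapping ks

theorem pick_eq (m : List (String × String)) (ks : List String) :
    pickFirst m ks = pyFirstNonempty (ks.map (mget m)) := by
  induction ks with
  | nil => rfl
  | cons k t ih =>
      simp only [pickFirst, List.map_cons]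
      cases mget m k with
      | none => simpa [pyFirstNonempty] using ih
      | some v => simp [pyFirstNonempty, ih]

-- rank of a key inside a candidate list
def rankIn (k : String) : List String → Option Nat
  | [] => none
  | x :: t => if x == k then some 0 else (rankIn k t).map (· + 1)

-- the projection of B's fold onto one field, as an abstract single-field scan
def run (g : String → Option Nat) (b : Option (Nat × String)) :
    List (String × String) → Option (Nat × String)
  | [] => b
  | kv :: t =>
      run g (match g kv.1 with
        | none => b
        | some r =>
            let s := PySem.Str.strip kv.2
            if s ≠ "" ∧ better r b then some (r, s) else b) t

-- key2field projected to one field equals rankIn of that field's candidate list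
def rk (f : String) (k : String) : Option Nat :=
  match key2field k with
  | some fr => if fr.1 = f then some fr.2 else none
  | none => none

theorem rk_project (k : String) :
    rk "project" k = rankIn k ["project", "project_name", "project_code"] := by
  unfold rk key2field
  simp only [PySem.Dict.get?_mk_cons, beq_iff_eq]
  by_cases h1 : "project" = k
  · subst h1; decide
  by_cases h2 : "project_name" = k
  · subst h2; decide
  by_cases h3 : "project_code" = k
  · subst h3; decide
  by_cases h4 : "unit_no" = k
  · subst h4; decide
  by_cases h5 : "unit" = k
  · subst h5; decide
  by_cases h6 : "unit_number" = k
  · subst h6; decide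
  by_cases h7 : "unit_id" = k
  · subst h7; decide
  by_cases h8 : "request_type" = k
  · subst h8; decide
  by_cases h9 : "req_type" = k
  · subst h9; decide
  by_cases h10 : "request_kind" = k
  · subst h10; decide
  by_cases h11 : "type" = k
  · subst h11; decide
  simp [rankIn, PySem.Dict.get?, h1, h2, h3, h4, h5, h6, h7, h8, h9, h10, h11]

theorem rk_unit (k : String) :
    rk "unit_no" k = rankIn k ["unit_no", "unit", "unit_number", "unit_id"] := by
  unfold rk key2field
  simp only [PySem.Dict.get?_mk_cons, beq_iff_eq]
  by_cases h1 : "project" = k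
  · subst h1; decide
  by_cases h2 : "project_name" = k
  · subst h2; decide
  by_cases h3 : "project_code" = k
  · subst h3; decide
  by_cases h4 : "unit_no" = k
  · subst h4; decide
  by_cases h5 : "unit" = k
  · subst h5; decide
  by_cases h6 : "unit_number" = k
  · subst h6; decide
  by_cases h7 : "unit_id" = k
  · subst h7; decide
  by_cases h8 : "request_type" = k
  · subst h8; decide
  by_cases h9 : "req_type" = k
  · subst h9; decide
  by_cases h10 : "request_kind" = k
  · subst h10; decide
  by_cases h11 : "type" = k
  · subst h11; decide
  simp [rankIn, PySem.Dict.get?, h1, h2, h3, h4, h5, h6, h7, h8, h9, h10, h11]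

theorem rk_req (k : String) :
    rk "request_type" k = rankIn k ["request_type", "req_type", "request_kind", "type"] := by
  unfold rk key2field
  simp only [PySem.Dict.get?_mk_cons, beq_iff_eq]
  by_cases h1 : "project" = k
  · subst h1; decide
  by_cases h2 : "project_name" = k
  · subst h2; decide
  by_cases h3 : "project_code" = k
  · subst h3; decide
  by_cases h4 : "unit_no" = k
  · subst h4; decide
  by_cases h5 : "unit" = k
  · subst h5; decide
  by_cases h6 : "unit_number" = k
  · subst h6; decide
  by_cases h7 : "unit_id" = k
  · subst h7; decide
  by_cases h8 : "request_type" = k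
  · subst h8; decide
  by_cases h9 : "req_type" = k
  · subst h9; decide
  by_cases h10 : "request_kind" = k
  · subst h10; decide
  by_cases h11 : "type" = k
  · subst h11; decide
  simp [rankIn, PySem.Dict.get?, h1, h2, h3, h4, h5, h6, h7, h8, h9, h10, h11]

-- each step of B's fold, seen through get? f
theorem bstep_get (best : PySem.Dict String (Nat × String)) (kv : String × String) (f : String) :
    (bstep best kv).get? f =
      (match rk f kv.1 with
        | none => best.get? f
        | some r =>
            let s := PySem.Str.strip kv.2
            if s ≠ "" ∧ better r (best.get? f) then some (r, s) else best.get? f) := by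
  cases hk : key2field kv.1 with
  | none =>
      have h1 : rk f kv.1 = none := by simp [rk, hk]
      simp [bstep, hk, h1]
  | some fr =>
      by_cases hf : fr.1 = f
      · have h1 : rk f kv.1 = some fr.2 := by simp [rk, hk, hf]
        rw [h1]
        subst hf
        simp only [bstep, hk]
        split_ifs with hc
        · simp [PySem.Dict.get?_insert_self]
        · rfl
      · have h1 : rk f kv.1 = none := by simp [rk, hk, hf]
        rw [h1]
        simp only [bstep, hk]
        split_ifs with hc
        · simp [PySem.Dict.get?_insert_of_ne _ _ (fun h => hf h.symm : f ≠ fr.1)]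
        · rfl

theorem fold_get (f : String) (l : List (String × String))
    (best : PySem.Dict String (Nat × String)) :
    (l.foldl bstep best).get? f = run (rk f) (best.get? f) l := by
  induction l generalizing best with
  | nil => rfl
  | cons kv t ih =>
      simp only [List.foldl_cons, run, ih (bstep best kv), bstep_get]

-- nothing ever beats a rank-0 entry
theorem run_absorb (g : String → Option Nat) (l : List (String × String)) (s : String) :
    run g (some (0, s)) l = some (0, s) := by
  induction l with
  | nil => rfl
  | cons kv t ih =>
      simp only [run]
      cases g kv.1 with
      | none => exact ih
      | some r => simpa [better] using ih

theorem rankIn_not_mem (k : String) (ks : List String) (hk : k ∉ ks) :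
    rankIn k ks = none := by
  induction ks with
  | nil => rfl
  | cons a t ih =>
      have ha : ¬ (a == k) := by simp; rintro rfl; exact hk List.mem_cons_self
      simp [rankIn, ha, ih (fun h => hk (List.mem_cons_of_mem _ h))]

-- shifting every rank by one does not change which entry wins
theorem run_shift (k : String) (ks : List String) (hk : k ∉ ks)
    (l : List (String × String)) (b : Option (Nat × String))
    (hl : ∀ kv ∈ l, kv.1 = k → PySem.Str.strip kv.2 = "") :
    run (fun x => rankIn x (k :: ks)) (b.map (fun p => (p.1 + 1, p.2))) l =
      (run (fun x => rankIn x ks) b l).map (fun p => (p.1 + 1, p.2)) := by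
  induction l generalizing b with
  | nil => rfl
  | cons kv t ih =>
      have hrest : ∀ kv ∈ t, kv.1 = k → PySem.Str.strip kv.2 = "" :=
        fun x hx => hl x (List.mem_cons_of_mem _ hx)
      by_cases hkk : kv.1 = k
      · have hs : PySem.Str.strip kv.2 = "" := hl kv (List.mem_cons_self) hkk
        have h1 : rankIn kv.1 (k :: ks) = some 0 := by simp [rankIn, hkk]
        have h2 : rankIn kv.1 ks = none := by
          subst hkk; exact rankIn_not_mem _ _ hk
        simp only [run, h1, h2, hs]
        simpa using ih b hrest
      · simp only [run]
        have h1 : rankIn kv.1 (k :: ks) = (rankIn kv.1 ks).map (· + 1) := by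
          simp [rankIn, Ne.symm hkk]
        rw [h1]
        cases hr : rankIn kv.1 ks with
        | none => simpa using ih b hrest
        | some r =>
            simp only [Option.map_some]
            have hb : better (r + 1) (b.map (fun p => (p.1 + 1, p.2))) = better r b := by
              cases b with
              | none => rfl
              | some p => simp [better]
            rw [hb]
            by_cases hc : PySem.Str.strip kv.2 ≠ "" ∧ better r b = true
            · rw [if_pos hc, if_pos hc]
              exact ih (some (r, PySem.Str.strip kv.2)) hrest
            · rw [if_neg hc, if_neg hc]
              exact ih b hrest

-- a present, non-empty head candidate wins with rank 0
theorem run_zero (k : String) (ks : List String) (v : String)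
    (hs : PySem.Str.strip v ≠ "")
    (l : List (String × String)) (b : Option (Nat × String))
    (hv : ∀ kv ∈ l, kv.1 = k → kv.2 = v)
    (hmem : k ∈ l.map Prod.fst)
    (hb : b = none ∨ ∃ p, b = some p ∧ 1 ≤ p.1) :
    run (fun x => rankIn x (k :: ks)) b l = some (0, PySem.Str.strip v) := by
  induction l generalizing b with
  | nil => simp at hmem
  | cons kv t ih =>
      have hrest : ∀ kv ∈ t, kv.1 = k → kv.2 = v :=
        fun x hx => hv x (List.mem_cons_of_mem _ hx)
      by_cases hkk : kv.1 = k
      · have hval : kv.2 = v := hv kv List.mem_cons_self hkk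
        have h1 : rankIn kv.1 (k :: ks) = some 0 := by simp [rankIn, hkk]
        have hbet : better 0 b = true := by
          rcases hb with rfl | ⟨p, rfl, hp⟩
          · rfl
          · simp [better]; omega
        simp only [run, h1, hval, hs, hbet, and_true, ne_eq, not_false_iff, if_pos]
        exact run_absorb _ _ _
      · have hmem' : k ∈ t.map Prod.fst := by
          rcases List.mem_cons.mp hmem with h | h
          · exact absurd h.symm hkk
          · exact h
        cases hr : rankIn kv.1 (k :: ks) with
        | none =>
            simp only [run, hr]
            exact ih b hrest hmem' hb
        | some r =>
            simp only [run, hr]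
            have hr1 : 1 ≤ r := by
              rw [rankIn, if_neg (by simpa using Ne.symm hkk)] at hr
              rcases Option.map_eq_some_iff.mp hr with ⟨a, _, ha2⟩
              omega
            by_cases hc : PySem.Str.strip kv.2 ≠ "" ∧ better r b = true
            · rw [if_pos hc]
              exact ih (some (r, PySem.Str.strip kv.2)) hrest hmem'
                (Or.inr ⟨(r, PySem.Str.strip kv.2), rfl, hr1⟩)
            · rw [if_neg hc]
              exact ih b hrest hmem' hb

-- under unique keys, every entry agrees with the first-match lookup
theorem mem_get (mapping : List (String × String))
    (hnd : (mapping.map Prod.fst).Nodup) (kv : String × String) (hm : kv ∈ mapping) :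
    mget mapping kv.1 = some kv.2 :=
  PySem.Dict.get?_of_mem_items (PySem.Dict.mk mapping) hm hnd

theorem mget_mem (mapping : List (String × String)) (k v : String)
    (h : mget mapping k = some v) : k ∈ mapping.map Prod.fst := by
  induction mapping with
  | nil => simp [mget, PySem.Dict.get?] at h
  | cons kv t ih =>
      rw [mget, PySem.Dict.get?_mk_cons] at h
      by_cases hk : kv.1 == k
      · simp [(by simpa using hk : kv.1 = k)]
      · rw [if_neg (by simpa using hk)] at h
        exact List.mem_cons_of_mem _ (ih h)

-- MAIN: B's single-field scan returns exactly A's candidate walk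
theorem run_eq_pick (mapping : List (String × String))
    (hnd : (mapping.map Prod.fst).Nodup) (ks : List String) (hks : ks.Nodup) :
    (run (fun x => rankIn x ks) none mapping).map Prod.snd =
      (if pickFirst mapping ks = "" then none else some (pickFirst mapping ks)) := by
  induction ks with
  | nil =>
      have hnone : ∀ l, run (fun x => rankIn x ([] : List String)) none l = none := by
        intro l
        induction l with
        | nil => rfl
        | cons kv t iht => simpa [run, rankIn] using iht
      simp [hnone, pickFirst]
  | cons k ks ih =>
      have hk : k ∉ ks := (List.nodup_cons.mp hks).1
      have hks' : ks.Nodup := (List.nodup_cons.mp hks).2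
      by_cases hwin : ∃ v, mget mapping k = some v ∧ PySem.Str.strip v ≠ ""
      · rcases hwin with ⟨v, hv, hsv⟩
        have hpick : pickFirst mapping (k :: ks) = PySem.Str.strip v := by
          simp [pickFirst, hv, hsv]
        have hval : ∀ kv ∈ mapping, kv.1 = k → kv.2 = v := by
          intro kv hm hkk
          have := mem_get mapping hnd kv hm
          rw [hkk, hv] at this
          exact (Option.some.inj this).symm
        have hmem : k ∈ mapping.map Prod.fst := mget_mem mapping k v hv
        rw [run_zero k ks v hsv mapping none hval hmem (Or.inl rfl), hpick]
        simp [hsv]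
      · have hskip : ∀ kv ∈ mapping, kv.1 = k → PySem.Str.strip kv.2 = "" := by
          intro kv hm hkk
          have hg := mem_get mapping hnd kv hm
          rw [hkk] at hg
          by_contra hne
          exact hwin ⟨kv.2, hg, hne⟩
        have hpick : pickFirst mapping (k :: ks) = pickFirst mapping ks := by
          simp only [pickFirst]
          cases hv : mget mapping k with
          | none => rfl
          | some v =>
              have : PySem.Str.strip v = "" := by
                by_contra hne
                exact hwin ⟨v, hv, hne⟩
              simp [this]
        have := run_shift k ks hk mapping none hskip
        simp only [Option.map_none] at this
        rw [this, hpick, ← ih hks']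
        cases run (fun x => rankIn x ks) none mapping <;> simp

-- B emits f exactly when the scan found something, with its string component
theorem emit_eq (best : PySem.Dict String (Nat × String)) (f : String)
    (out : List (String × String)) (a : String)
    (h : (best.get? f).map Prod.snd = if a = "" then none else some a) :
    (match best.get? f with
      | some p => out ++ [(f, p.2)]
      | none => out) = if a = "" then out else out ++ [(f, a)] := by
  cases hg : best.get? f with
  | none =>
      rw [hg] at h
      by_cases ha : a = "" <;> simp_all
  | some p =>
      rw [hg] at h
      by_cases ha : a = "" <;> simp_all

-- ===== VERDICT (by name: the statement is the Claim_ definition above) =====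
theorem extract_setup_values_spec : Claim_equal_extract_setup_values := by
  intro mapping _ hnd
  unfold Pre_extract_setup_values at hnd
  unfold Spec_extract_setup_values extract_setup_values extract_setup_values_alt
  simp only [List.foldl_cons, List.foldl_nil]
  have hget : ∀ f : String, (mapping.foldl bstep PySem.Dict.empty).get? f = run (rk f) none mapping :=
    fun f => by rw [fold_get, PySem.Dict.get?_empty]
  have hP : ((mapping.foldl bstep PySem.Dict.empty).get? "project").map Prod.snd =
      (if pickFirst mapping ["project", "project_name", "project_code"] = "" then none
       else some (pickFirst mapping ["project", "project_name", "project_code"])) := by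
    rw [hget "project", funext rk_project]
    exact run_eq_pick mapping hnd _ (by decide)
  have hU : ((mapping.foldl bstep PySem.Dict.empty).get? "unit_no").map Prod.snd =
      (if pickFirst mapping ["unit_no", "unit", "unit_number", "unit_id"] = "" then none
       else some (pickFirst mapping ["unit_no", "unit", "unit_number", "unit_id"])) := by
    rw [hget "unit_no", funext rk_unit]
    exact run_eq_pick mapping hnd _ (by decide)
  have hR : ((mapping.foldl bstep PySem.Dict.empty).get? "request_type").map Prod.snd =
      (if pickFirst mapping ["request_type", "req_type", "request_kind", "type"] = "" then none
       else some (pickFirst mapping ["request_type", "req_type", "request_kind", "type"])) := by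
    rw [hget "request_type", funext rk_req]
    exact run_eq_pick mapping hnd _ (by decide)
  rw [emit_eq _ _ _ _ hP, emit_eq _ _ _ _ hU, emit_eq _ _ _ _ hR]
  rw [pick_eq, pick_eq, pick_eq]
  simp only [List.map_cons, List.map_nil]
  set p := pyFirstNonempty [mget mapping "project", mget mapping "project_name", mget mapping "project_code"] with hp
  set u := pyFirstNonempty [mget mapping "unit_no", mget mapping "unit", mget mapping "unit_number", mget mapping "unit_id"] with hu
  set r := pyFirstNonempty [mget mapping "request_type", mget mapping "req_type", mget mapping "request_kind", mget mapping "type"] with hr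
  have sp : PySem.Str.strip p = p := hp ▸ strip_firstNonempty _
  have su : PySem.Str.strip u = u := hu ▸ strip_firstNonempty _
  have sr : PySem.Str.strip r = r := hr ▸ strip_firstNonempty _
  have se : PySem.Str.strip "" = "" := rfl
  by_cases h1 : p = "" <;> by_cases h2 : u = "" <;> by_cases h3 : r = "" <;>
    simp only [h1, h2, h3, if_true, if_false, ite_not, sp, su, sr, se, List.filter_cons,
      List.filter_nil, decide_not] <;>
    simp [h1, h2, h3, sp, su, sr, se]
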